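-- pv_equiv track=rewrite | github.com/MrHuff/F3M | prototype.py | recursive_divide
-- ===== SOURCE A (Python) =====
-- def recursive_divide(input=[], memory=[]):
--     if not input:
--         return memory
--     else:
--         cut = input.pop(0)
--         anti_cut = ~cut
--         if not memory:
--             memory = [cut, anti_cut]
--             return recursive_divide(input,memory)
--         else:
--             memory = [el*cut for el in memory]+ [el*anti_cut for el in memory]
--             return recursive_divide(input,memory)
-- ===== SOURCE B (Python) =====
-- def recursive_divide(input=[], memory=[]):
--     while input:
--         cut = input.pop(0)
--         anti_cut = ~cut
--         if memory:
--             memory = [el * cut for el in memory] + [el * anti_cut for el in memory]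
--         else:
--             memory = [cut, anti_cut]
--     return memory
-- ===== Notes on version B (the rewrite author's own statement) =====
-- stated objective: simpler
-- what changed: Replaced the tail recursion with an iterative while-loop that pops from input and reassigns memory, dropping the recursive call chain.
import Mathlib
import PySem

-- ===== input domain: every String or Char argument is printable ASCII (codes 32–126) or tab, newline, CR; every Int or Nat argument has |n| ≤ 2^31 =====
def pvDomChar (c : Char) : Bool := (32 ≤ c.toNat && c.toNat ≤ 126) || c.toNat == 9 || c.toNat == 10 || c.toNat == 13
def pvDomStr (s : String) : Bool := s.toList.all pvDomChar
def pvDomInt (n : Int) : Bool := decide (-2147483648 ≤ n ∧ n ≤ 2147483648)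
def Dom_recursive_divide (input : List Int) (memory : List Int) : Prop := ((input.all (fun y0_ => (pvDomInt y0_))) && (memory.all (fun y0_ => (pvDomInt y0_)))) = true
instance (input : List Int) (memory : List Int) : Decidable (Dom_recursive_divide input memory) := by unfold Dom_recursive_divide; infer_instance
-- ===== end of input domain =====

-- B replaces A's tail recursion by an iterative while-loop (same values, simpler control flow).
-- Note: both Pythons mutate `input` in place (it is emptied via pop(0)); the equivalence proved
-- here is about the RETURN value.

-- ===== PORT A =====
-- A: recursion on input; `~cut` on ints is -cut - 1; `not memory` tests emptiness.
def recursive_divide (input : List Int) (memory : List Int) : List Int :=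
  match input, memory with
  | [], memory => memory
  | cut :: rest, memory =>
    let anti_cut : Int := -cut - 1
    if memory = [] then
      recursive_divide rest [cut, anti_cut]
    else
      recursive_divide rest (memory.map (fun el => el * cut) ++ memory.map (fun el => el * anti_cut))

-- ===== PORT B =====
-- B: one left fold over input carrying memory as the accumulator (the while-loop's state).
def recursive_divide_alt (input : List Int) (memory : List Int) : List Int :=
  input.foldl
    (fun mem cut =>
      let anti_cut : Int := -cut - 1
      if mem ≠ [] then mem.map (fun el => el * cut) ++ mem.map (fun el => el * anti_cut)
      else [cut, anti_cut])
    memory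

-- ===== PRECONDITION & SPEC =====
def Spec_recursive_divide (input : List Int) (memory : List Int) (out : List Int) : Prop := out = recursive_divide_alt input memory
instance (input : List Int) (memory : List Int) (out : List Int) : Decidable (Spec_recursive_divide input memory out) := by unfold Spec_recursive_divide; infer_instance

-- ===== CLAIM (what is proved, stated in full; the proofs are below) =====
def Claim_equal_recursive_divide : Prop := ∀ (input : List Int) (memory : List Int), Dom_recursive_divide input memory → Spec_recursive_divide input memory (recursive_divide input memory)

-- ===== LEMMAS AND PROOFS =====
theorem recursive_divide_eq_alt (input : List Int) (memory : List Int) :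
    recursive_divide input memory = recursive_divide_alt input memory := by
  induction input generalizing memory with
  | nil => simp [recursive_divide, recursive_divide_alt]
  | cons cut rest ih =>
    simp only [recursive_divide, recursive_divide_alt, List.foldl_cons]
    by_cases h : memory = [] <;>
      simp [h, ih, recursive_divide_alt]

-- ===== VERDICT (by name: the statement is the Claim_ definition above) =====
theorem recursive_divide_spec : Claim_equal_recursive_divide := by
  intro input memory _
  unfold Spec_recursive_divide
  exact recursive_divide_eq_alt input memory
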